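-- pv_equiv track=rewrite | github.com/thomas-ae-smith/comp3001-group-blokus | src/blokus/common.py | _rotate_bitmap
-- ===== SOURCE A (Python) =====
-- def _rotate_bitmap(bitmap, times):
-- 	if (times % 4) > 0:
-- 		rotated_bitmap = []
-- 		for row in range(len(bitmap[0])):
-- 			rotated_row = []
-- 			for col in range(len(bitmap)):
-- 				rotated_row.append(
-- 					bitmap[len(bitmap) - 1 - col][row]
-- 					)
-- 			rotated_bitmap.append(tuple(rotated_row))
-- 		return _rotate_bitmap(rotated_bitmap, times - 1)
-- 	else:
-- 		return tuple(bitmap)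
-- ===== SOURCE B (Python) =====
-- def _rotate_bitmap(bitmap, times):
--     n = times % 4
--     if n == 0:
--         return tuple(bitmap)
--     R, C = len(bitmap), len(bitmap[0])
--     if n == 1:
--         return tuple(tuple(bitmap[R - 1 - j][i] for j in range(R)) for i in range(C))
--     if n == 2:
--         return tuple(tuple(bitmap[R - 1 - i][C - 1 - j] for j in range(C)) for i in range(R))
--     return tuple(tuple(bitmap[j][C - 1 - i] for j in range(R)) for i in range(C))
-- ===== Notes on version B (the rewrite author's own statement) =====
-- stated objective: simpler
-- what changed: B computes n = times % 4 once and builds the result in a single pass with the closed-form index formula for that n (out[i][j] = bitmap[R-1-j][i] / bitmap[R-1-i][C-1-j] / bitmap[j][C-1-i]), instead of A's up-to-three recursive single rotations that materialise an intermediate grid per step.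
import Mathlib
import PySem

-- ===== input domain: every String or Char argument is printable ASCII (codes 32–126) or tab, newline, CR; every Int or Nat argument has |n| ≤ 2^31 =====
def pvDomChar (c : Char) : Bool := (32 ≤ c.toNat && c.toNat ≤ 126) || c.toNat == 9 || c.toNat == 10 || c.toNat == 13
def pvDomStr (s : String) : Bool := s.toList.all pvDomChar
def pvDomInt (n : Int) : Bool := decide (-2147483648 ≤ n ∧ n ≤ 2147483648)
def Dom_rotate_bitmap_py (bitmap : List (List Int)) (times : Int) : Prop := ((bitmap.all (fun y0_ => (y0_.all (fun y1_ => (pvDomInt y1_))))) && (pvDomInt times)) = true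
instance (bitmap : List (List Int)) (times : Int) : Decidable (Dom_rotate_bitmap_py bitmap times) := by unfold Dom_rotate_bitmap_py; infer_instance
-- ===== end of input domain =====

-- B rotates in ONE pass with the closed-form index formula for n = times % 4, instead of
-- A's up-to-three recursive single rotations; same return value on all of Pre_.

-- ===== PORT A =====
-- bitmap[r][c] for Nat indices; under Pre_ every access A makes is in range, so the
-- getD defaults are never the value returned (Python raises exactly outside Pre_).
def pvGet (b : List (List Int)) (r c : Nat) : Int := (b.getD r []).getD c 0

-- one rotation step of A (the rotated_bitmap the loop builds from bitmap)
def pvRot1 (b : List (List Int)) : List (List Int) :=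
  (List.range (b.headD []).length).map (fun row =>
    (List.range b.length).map (fun col => pvGet b (b.length - 1 - col) row))

def rotate_bitmap_py (bitmap : List (List Int)) (times : Int) : List (List Int) :=
  if h : 0 < PySem.Int.mod times 4 then
    rotate_bitmap_py (pvRot1 bitmap) (times - 1)
  else bitmap
termination_by (PySem.Int.mod times 4).toNat
decreasing_by
  simp only [PySem.Int.mod_eq_emod_of_pos (show (0:Int) < 4 by norm_num)] at *
  omega

-- ===== PORT B =====
def rotate_bitmap_py_alt (bitmap : List (List Int)) (times : Int) : List (List Int) :=
  let n := PySem.Int.mod times 4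
  if n = 0 then bitmap
  else
    let R := bitmap.length
    let C := (bitmap.headD []).length   -- bitmap[0]; Pre_ guarantees bitmap ≠ [] here
    if n = 1 then
      (List.range C).map (fun i => (List.range R).map (fun j => pvGet bitmap (R - 1 - j) i))
    else if n = 2 then
      (List.range R).map (fun i => (List.range C).map (fun j => pvGet bitmap (R - 1 - i) (C - 1 - j)))
    else
      (List.range C).map (fun i => (List.range R).map (fun j => pvGet bitmap j (C - 1 - i)))

-- ===== PRECONDITION & SPEC =====
-- Pre_ excludes exactly the inputs where Python A raises IndexError: with n = times % 4 > 0,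
-- an empty bitmap, a row shorter than the first row, or a zero-width first row when n ≥ 2
-- (the recursion then hits an empty intermediate grid).
def Pre_rotate_bitmap_py (bitmap : List (List Int)) (times : Int) : Prop :=
  PySem.Int.mod times 4 = 0 ∨
    (bitmap ≠ [] ∧ (∀ row ∈ bitmap, (bitmap.headD []).length ≤ row.length) ∧
      (0 < (bitmap.headD []).length ∨ PySem.Int.mod times 4 = 1))
instance (bitmap : List (List Int)) (times : Int) : Decidable (Pre_rotate_bitmap_py bitmap times) := by unfold Pre_rotate_bitmap_py; infer_instance

def pvWitness_rotate_bitmap_py : List (List Int) × Int := ([[1, 2], [3, 4]], 3)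

def Spec_rotate_bitmap_py (bitmap : List (List Int)) (times : Int) (out : List (List Int)) : Prop := out = rotate_bitmap_py_alt bitmap times
instance (bitmap : List (List Int)) (times : Int) (out : List (List Int)) : Decidable (Spec_rotate_bitmap_py bitmap times out) := by unfold Spec_rotate_bitmap_py; infer_instance

-- ===== CLAIM (what is proved, stated in full; the proofs are below) =====
def Claim_equal_rotate_bitmap_py : Prop := ∀ (bitmap : List (List Int)) (times : Int), Dom_rotate_bitmap_py bitmap times → Pre_rotate_bitmap_py bitmap times → Spec_rotate_bitmap_py bitmap times (rotate_bitmap_py bitmap times)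

-- ===== LEMMAS AND PROOFS =====

theorem pvA_pos (b : List (List Int)) (t : Int) (h : 0 < PySem.Int.mod t 4) :
    rotate_bitmap_py b t = rotate_bitmap_py (pvRot1 b) (t - 1) := by
  conv_lhs => rw [rotate_bitmap_py]
  rw [dif_pos h]

theorem pvA_zero (b : List (List Int)) (t : Int) (h : PySem.Int.mod t 4 = 0) :
    rotate_bitmap_py b t = b := by
  conv_lhs => rw [rotate_bitmap_py]
  rw [dif_neg (by omega)]

theorem pvMod_step (t : Int) (h : 0 < PySem.Int.mod t 4) :
    PySem.Int.mod (t - 1) 4 = PySem.Int.mod t 4 - 1 := by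
  simp only [PySem.Int.mod_eq_emod_of_pos (show (0:Int) < 4 by norm_num)] at *
  omega

-- one rotation of a rectangular R×C grid given by an index function (R > 0)
theorem pvRot1_grid (f : Nat → Nat → Int) (R C : Nat) (hR : 0 < R) :
    pvRot1 ((List.range R).map (fun i => (List.range C).map (fun j => f i j)))
      = (List.range C).map (fun i => (List.range R).map (fun j => f (R - 1 - j) i)) := by
  have hhead : (((List.range R).map (fun i => (List.range C).map (fun j => f i j))).headD []) =
      (List.range C).map (fun j => f 0 j) := by
    obtain ⟨R', rfl⟩ : ∃ R', R = R' + 1 := ⟨R - 1, by omega⟩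
    simp [List.range_succ_eq_map]
  unfold pvRot1
  rw [hhead]
  simp only [List.length_map, List.length_range]
  apply List.map_congr_left
  intro i hi
  apply List.map_congr_left
  intro j hj
  simp only [List.mem_range] at hi hj
  have hlt : R - 1 - j < R := by omega
  simp [pvGet, List.getD_eq_getElem?_getD, hlt, hi]

theorem pvRot1_as_grid (b : List (List Int)) :
    pvRot1 b = (List.range (b.headD []).length).map
      (fun i => (List.range b.length).map (fun j => pvGet b (b.length - 1 - j) i)) := rfl

-- ===== VERDICT (by name: the statement is the Claim_ definition above) =====
theorem rotate_bitmap_py_spec : Claim_equal_rotate_bitmap_py := by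
  intro b t _ hpre
  unfold Spec_rotate_bitmap_py
  have h0 : 0 ≤ PySem.Int.mod t 4 := PySem.Int.mod_nonneg _ (by norm_num)
  have h4 : PySem.Int.mod t 4 < 4 := PySem.Int.mod_lt _ (by norm_num)
  rcases (by omega : PySem.Int.mod t 4 = 0 ∨ PySem.Int.mod t 4 = 1 ∨
      PySem.Int.mod t 4 = 2 ∨ PySem.Int.mod t 4 = 3) with hn | hn | hn | hn
  · rw [pvA_zero b t hn]
    simp only [rotate_bitmap_py_alt, hn]
    norm_num
  all_goals
    have hR : 0 < b.length := by
      rcases hpre with h | ⟨hne, _, _⟩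
      · omega
      · cases b with
        | nil => exact absurd rfl hne
        | cons x xs => simp
  · -- n = 1
    rw [pvA_pos b t (by omega), pvA_zero _ _ (by rw [pvMod_step t (by omega)]; omega)]
    simp only [rotate_bitmap_py_alt, hn]
    norm_num [pvRot1_as_grid]
  · -- n = 2
    have hC : 0 < (b.headD []).length := by
      rcases hpre with h | ⟨_, _, h | h⟩ <;> omega
    rw [pvA_pos b t (by omega), pvA_pos _ _ (by rw [pvMod_step t (by omega)]; omega),
      pvA_zero _ _ (by rw [pvMod_step (t-1) (by rw [pvMod_step t (by omega)]; omega),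
        pvMod_step t (by omega)]; omega)]
    rw [pvRot1_as_grid b, pvRot1_grid _ _ _ hC]
    simp only [rotate_bitmap_py_alt, hn]
    norm_num
  · -- n = 3
    have hC : 0 < (b.headD []).length := by
      rcases hpre with h | ⟨_, _, h | h⟩ <;> omega
    have h1 : PySem.Int.mod (t - 1) 4 = 2 := by rw [pvMod_step t (by omega)]; omega
    have h2 : PySem.Int.mod (t - 1 - 1) 4 = 1 := by rw [pvMod_step (t - 1) (by omega)]; omega
    have h3 : PySem.Int.mod (t - 1 - 1 - 1) 4 = 0 := by rw [pvMod_step (t - 1 - 1) (by omega)]; omega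
    rw [pvA_pos b t (by omega), pvA_pos _ _ (by omega), pvA_pos _ _ (by omega), pvA_zero _ _ h3]
    rw [pvRot1_as_grid b, pvRot1_grid _ _ _ hC, pvRot1_grid _ _ _ hR]
    simp only [rotate_bitmap_py_alt, hn]
    norm_num
    intro i hi j hj
    congr 1
    omega
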